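-- pv_equiv track=rewrite | github.com/HSLdevcom/hfp-analytics | python/common/container_client.py | _filter_blob_names
-- ===== SOURCE A (Python) =====
-- from typing import List
--
-- def _filter_blob_names(blob_names: List[str], available_dates: List[str]):
--     filtered_blob_names = []
--
--     for blob_name in blob_names:
--         for date in available_dates:
--             if date in blob_name:
--                 filtered_blob_names.append(blob_name)
--                 break
--
--     # remove blob folders
--     filtered_blob_names = [blob_name for blob_name in filtered_blob_names if blob_name.count('/') == 3]
--
--     return filtered_blob_names
-- ===== SOURCE B (Python) =====
-- from typing import List
--
-- def _filter_blob_names(blob_names: List[str], available_dates: List[str]):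
--     # Inverted traversal: dates drive the outer loop, marking a boolean array
--     # over the still-unmatched blob indices, which shrink as they match;
--     # then one ordered collection pass over (flag, blob) pairs.
--     matched = [False] * len(blob_names)
--     pending = list(range(len(blob_names)))
--     for date in available_dates:
--         if not pending:
--             break
--         still = []
--         for i in pending:
--             if date in blob_names[i]:
--                 matched[i] = True
--             else:
--                 still.append(i)
--         pending = still
--     out = []
--     for flag, blob_name in zip(matched, blob_names):
--         if flag and blob_name.count('/') == 3:
--             out.append(blob_name)
--     return out
-- ===== Notes on version B (the rewrite author's own statement) =====
-- stated objective: alternative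
-- what changed: Inverts the loop nesting: B iterates dates in the OUTER loop, each date marking a boolean array over a shrinking list of still-unmatched blob indices, then collects marked blobs with exactly three slashes in one ordered zip pass; correct because a blob is kept iff some date occurs in it, regardless of which loop is outer.
import Mathlib
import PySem

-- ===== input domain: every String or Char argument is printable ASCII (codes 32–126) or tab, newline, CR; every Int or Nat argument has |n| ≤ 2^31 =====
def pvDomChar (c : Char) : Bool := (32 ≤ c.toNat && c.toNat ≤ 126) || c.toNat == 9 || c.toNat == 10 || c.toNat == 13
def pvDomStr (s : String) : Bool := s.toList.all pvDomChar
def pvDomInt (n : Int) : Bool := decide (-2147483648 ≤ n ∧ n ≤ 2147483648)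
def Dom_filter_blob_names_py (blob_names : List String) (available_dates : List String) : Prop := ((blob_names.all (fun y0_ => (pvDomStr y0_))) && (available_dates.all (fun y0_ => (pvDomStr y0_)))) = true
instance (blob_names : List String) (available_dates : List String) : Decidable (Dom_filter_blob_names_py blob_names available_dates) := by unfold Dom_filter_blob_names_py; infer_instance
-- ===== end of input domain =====

-- B inverts the loop nesting: dates drive an outer marking pass over a boolean array indexed by a shrinking pending list, then one ordered collection pass (alternative; same cost).

-- ===== PORT A =====
-- inner 'for date in available_dates: if date in blob_name: append; break' loop, as the predicate it computes
def pvMatchLoop (dates : List String) (b : String) : Bool :=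
  match dates with
  | [] => false
  | d :: rest => if PySem.Str.isIn d b then true else pvMatchLoop rest b

def filter_blob_names_py (blob_names : List String) (available_dates : List String) : List String :=
  let filtered := blob_names.foldl
    (fun acc blob_name => if pvMatchLoop available_dates blob_name then acc ++ [blob_name] else acc) []
  filtered.filter (fun blob_name => PySem.Str.count blob_name "/" == 3)

-- ===== PORT B =====
-- body of 'for i in pending: if date in blob_names[i]: matched[i] = True else: still.append(i)'
-- (indices come from range(len(blob_names)) so blob_names[i] is always in range; getD is exact there)
def pvInnerStep (blob_names : List String) (date : String)
    (st : List Bool × List Nat) (i : Nat) : List Bool × List Nat :=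
  if PySem.Str.isIn date (blob_names.getD i "") then (st.1.set i true, st.2) else (st.1, st.2 ++ [i])

-- one iteration of 'for date in available_dates': 'if not pending: break' (once pending is
-- empty every later iteration would be a no-op, so the break is the skip here)
def pvDatePass (blob_names : List String) (st : List Bool × List Nat) (date : String) :
    List Bool × List Nat :=
  if st.2.isEmpty then st
  else st.2.foldl (pvInnerStep blob_names date) (st.1, [])

def filter_blob_names_py_alt (blob_names : List String) (available_dates : List String) : List String :=
  let st := available_dates.foldl (pvDatePass blob_names)
    (blob_names.map (fun _ => false), List.range blob_names.length)
  (st.1.zip blob_names).foldl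
    (fun out p => if p.1 && (PySem.Str.count p.2 "/" == 3) then out ++ [p.2] else out) []

-- ===== PRECONDITION & SPEC =====
def Spec_filter_blob_names_py (blob_names : List String) (available_dates : List String) (out : List String) : Prop := out = filter_blob_names_py_alt blob_names available_dates
instance (blob_names : List String) (available_dates : List String) (out : List String) : Decidable (Spec_filter_blob_names_py blob_names available_dates out) := by unfold Spec_filter_blob_names_py; infer_instance

-- ===== CLAIM (what is proved, stated in full; the proofs are below) =====
def Claim_equal_filter_blob_names_py : Prop := ∀ (blob_names : List String) (available_dates : List String), Dom_filter_blob_names_py blob_names available_dates → Spec_filter_blob_names_py blob_names available_dates (filter_blob_names_py blob_names available_dates)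

-- ===== LEMMAS AND PROOFS =====
theorem pvMatchLoop_eq_any (dates : List String) (b : String) :
    pvMatchLoop dates b = dates.any (fun d => PySem.Str.isIn d b) := by
  induction dates with
  | nil => rfl
  | cons d rest ih =>
      unfold pvMatchLoop
      rw [List.any_cons, ih]
      cases PySem.Str.isIn d b <;> simp

theorem pvInnerStep_eq (bs : List String) (d : String) (m : List Bool) (acc : List Nat) (i : Nat) :
    pvInnerStep bs d (m, acc) i
      = if PySem.Str.isIn d (bs.getD i "") then (m.set i true, acc) else (m, acc ++ [i]) := rfl

theorem pvDatePass_eq (bs : List String) (st : List Bool × List Nat) (d : String) :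
    pvDatePass bs st d
      = if st.2.isEmpty then st else st.2.foldl (pvInnerStep bs d) (st.1, []) := rfl

theorem pvInner_len (bs : List String) (d : String) (p : List Nat) (m : List Bool) (acc : List Nat) :
    ((p.foldl (pvInnerStep bs d) (m, acc)).1).length = m.length := by
  induction p generalizing m acc with
  | nil => rfl
  | cons i p ih =>
      rw [List.foldl_cons, pvInnerStep_eq]
      split
      · rw [ih]; exact List.length_set ..
      · exact ih ..

theorem pvInner_snd (bs : List String) (d : String) (p : List Nat) (m : List Bool) (acc : List Nat) :
    (p.foldl (pvInnerStep bs d) (m, acc)).2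
      = acc ++ p.filter (fun i => ! PySem.Str.isIn d (bs.getD i "")) := by
  induction p generalizing m acc with
  | nil => simp
  | cons i p ih =>
      rw [List.foldl_cons, pvInnerStep_eq]
      by_cases h : PySem.Str.isIn d (bs.getD i "") = true
      · rw [if_pos h, ih, List.filter_cons]
        simp only [List.getD_eq_getElem?_getD, PySem.Str.isIn_eq] at h
        simp [h]
      · rw [if_neg h, ih, List.filter_cons]
        simp only [Bool.not_eq_true, List.getD_eq_getElem?_getD, PySem.Str.isIn_eq] at h
        simp [h]

theorem pvInner_fst_getD (bs : List String) (d : String) (p : List Nat) (m : List Bool)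
    (acc : List Nat) (j : Nat) (hp : ∀ i ∈ p, i < m.length) :
    ((p.foldl (pvInnerStep bs d) (m, acc)).1).getD j false
      = (m.getD j false || (decide (j ∈ p) && PySem.Str.isIn d (bs.getD j ""))) := by
  induction p generalizing m acc with
  | nil => simp
  | cons i p ih =>
      rw [List.foldl_cons, pvInnerStep_eq]
      have hi : i < m.length := hp i List.mem_cons_self
      by_cases h : PySem.Str.isIn d (bs.getD i "") = true
      · rw [if_pos h]
        rw [ih _ _ (fun k hk => by rw [List.length_set]; exact hp k (List.mem_cons_of_mem _ hk))]
        by_cases hj : j = i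
        · subst hj
          have hset : (m.set j true).getD j false = true := by
            simp [List.getD, List.getElem?_set_self hi]
          rw [hset]
          simp only [List.getD_eq_getElem?_getD, PySem.Str.isIn_eq] at h
          simp [h]
        · have hset : (m.set i true).getD j false = m.getD j false := by
            simp [List.getD, List.getElem?_set_ne (fun e => hj e.symm)]
          rw [hset]
          simp [List.mem_cons, hj]
      · rw [if_neg h]
        rw [ih _ _ (fun k hk => hp k (List.mem_cons_of_mem _ hk))]
        simp only [Bool.not_eq_true, List.getD_eq_getElem?_getD, PySem.Str.isIn_eq] at h
        by_cases hj : j = i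
        · subst hj
          simp [h]
        · simp [List.mem_cons, hj]

-- one full date pass on a canonical state (matched = bs.map g, pending = unmatched indices)
-- one full date pass on a canonical state (matched = bs.map g, pending = unmatched indices)
theorem pvPass_eq (bs : List String) (d : String) (g : String → Bool) :
    ((List.range bs.length).filter (fun i => !(g (bs.getD i "")))).foldl
        (pvInnerStep bs d) (bs.map g, [])
      = (bs.map (fun b => g b || PySem.Str.isIn d b),
         (List.range bs.length).filter
           (fun i => !(g (bs.getD i "") || PySem.Str.isIn d (bs.getD i "")))) := by
  have hp : ∀ i ∈ (List.range bs.length).filter (fun i => !(g (bs.getD i ""))),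
      i < (bs.map g).length := by
    intro i hi
    have := List.mem_range.mp (List.mem_of_mem_filter hi)
    simpa using this
  refine Prod.ext ?_ ?_
  · -- matched component, elementwise
    apply List.ext_getElem
    · rw [pvInner_len]; simp
    · intro j h1 h2
      have hj : j < bs.length := by simpa using h2
      have e1 := List.getD_eq_getElem _ false h1
      have e2 := List.getD_eq_getElem _ false h2
      rw [← e1, ← e2, pvInner_fst_getD bs d _ (bs.map g) [] j hp]
      have hb : bs.getD j "" = bs[j] := List.getD_eq_getElem bs "" hj
      have hm : (bs.map g).getD j false = g bs[j] := by
        rw [List.getD_eq_getElem _ false (by simpa using hj), List.getElem_map]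
      have hmem : decide (j ∈ (List.range bs.length).filter (fun i => !(g (bs.getD i ""))))
          = !(g bs[j]) := by
        simp [List.mem_filter, List.mem_range, hj]
      rw [hm, hmem, hb]
      have hmr : (List.map (fun b => g b || PySem.Str.isIn d b) bs).getD j false
          = (g bs[j] || PySem.Str.isIn d bs[j]) := by
        rw [List.getD_eq_getElem _ false (by simpa using hj), List.getElem_map]
      rw [hmr]
      cases g bs[j] <;> simp
  · rw [pvInner_snd, List.nil_append, List.filter_filter]
    apply List.filter_congr
    intro i _
    cases g (bs.getD i "") <;> cases PySem.Str.isIn d (bs.getD i "") <;> simp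

-- the whole dates loop on a canonical state
theorem pvFoldDates (bs : List String) (dates : List String) (g : String → Bool) :
    dates.foldl (pvDatePass bs)
        (bs.map g, (List.range bs.length).filter (fun i => !(g (bs.getD i ""))))
      = (bs.map (fun b => g b || dates.any (fun d => PySem.Str.isIn d b)),
         (List.range bs.length).filter
           (fun i => !(g (bs.getD i "") || dates.any (fun d => PySem.Str.isIn d (bs.getD i ""))))) := by
  induction dates generalizing g with
  | nil => simp
  | cons d ds ih =>
      rw [List.foldl_cons, pvDatePass_eq]
      by_cases hemp : ((List.range bs.length).filter (fun i => !(g (bs.getD i "")))).isEmpty = true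
      · rw [if_pos hemp]
        have hnil : (List.range bs.length).filter (fun i => !(g (bs.getD i ""))) = [] :=
          List.isEmpty_iff.mp hemp
        have hall : ∀ i (hi : i < bs.length), g (bs[i]'hi) = true := by
          intro i hi
          by_contra hgi
          rw [Bool.not_eq_true] at hgi
          have hmem : i ∈ (List.range bs.length).filter (fun i => !(g (bs.getD i ""))) := by
            simp [List.mem_filter, List.mem_range, hi, hgi]
          rw [hnil] at hmem
          exact absurd hmem (List.not_mem_nil)
        rw [ih g]
        refine Prod.ext ?_ ?_
        · apply List.map_congr_left
          intro b hb
          obtain ⟨i, hi, rfl⟩ := List.mem_iff_getElem.mp hb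
          have := hall i hi
          simp [this]
        · apply List.filter_congr
          intro i hmemr
          have hi := List.mem_range.mp hmemr
          have := hall i hi
          simp [List.getElem?_eq_getElem hi, this]
      · rw [if_neg hemp]
        rw [pvPass_eq bs d g, ih (fun b => g b || PySem.Str.isIn d b)]
        refine Prod.ext ?_ ?_
        · apply List.map_congr_left
          intro b _
          rw [List.any_cons, Bool.or_assoc]
        · apply List.filter_congr
          intro i _
          rw [List.any_cons, Bool.or_assoc]

-- the final collection pass over (flag, blob) pairs, when flags are bs.map g
theorem pvCollect (blob_names : List String) (g c : String → Bool) :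
    ((blob_names.map (fun b => g b)).zip blob_names).foldl
        (fun out p => if p.1 && c p.2 then out ++ [p.2] else out) []
      = blob_names.filter (fun b => g b && c b) := by
  have key : ∀ (l : List String) (acc : List String),
      ((l.map (fun b => g b)).zip l).foldl
        (fun out p => if p.1 && c p.2 then out ++ [p.2] else out) acc
      = acc ++ l.filter (fun b => g b && c b) := by
    intro l
    induction l with
    | nil => simp
    | cons b rest ih =>
        intro acc
        simp only [List.map_cons, List.zip_cons_cons, List.foldl_cons, List.filter_cons]
        by_cases h : (g b && c b) = true
        · rw [if_pos h, ih]; simp [h]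
        · rw [if_neg h, ih]; simp [h]
  simpa using key blob_names []

-- ===== VERDICT (by name: the statement is the Claim_ definition above) =====
theorem filter_blob_names_py_spec : Claim_equal_filter_blob_names_py := by
  intro blob_names available_dates _
  unfold Spec_filter_blob_names_py filter_blob_names_py filter_blob_names_py_alt
  have hinit : (blob_names.map (fun _ => false), List.range blob_names.length)
      = ((blob_names.map (fun _ => false)),
         (List.range blob_names.length).filter
           (fun i => !((fun _ : String => false) (blob_names.getD i "")))) := by
    simp
  rw [hinit, pvFoldDates blob_names available_dates (fun _ => false)]
  simp only [Bool.false_or]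
  rw [pvCollect blob_names (fun b => available_dates.any fun d => PySem.Str.isIn d b)
        (fun b => PySem.Str.count b "/" == 3)]
  simp only [PySem.List.foldl_append_if_eq_filter, List.nil_append, pvMatchLoop_eq_any,
    List.filter_filter]
  apply List.filter_congr
  intro b _
  exact Bool.and_comm _ _
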